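-- pv_equiv track=rewrite | github.com/Brunadisner/Trabalho2BD | trab2BD.py | busca_ckpt
-- ===== SOURCE A (Python) =====
-- def busca_ckpt(arquivo_linhas):
--     start = 0
--     end  = False
--
--     for i, linha in enumerate(arquivo_linhas):
--         if 'Start CKPT' in linha:
--             start = i
--         if 'End CKPT' in linha:
--             end = True
--     return start, end
-- ===== SOURCE B (Python) =====
-- def busca_ckpt(arquivo_linhas):
--     end = any('End CKPT' in linha for linha in arquivo_linhas)
--     start = 0
--     for i in range(len(arquivo_linhas) - 1, -1, -1):
--         if 'Start CKPT' in arquivo_linhas[i]: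
--             start = i
--             break
--     return start, end
-- ===== Notes on version B (the rewrite author's own statement) =====
-- stated objective: alternative
-- what changed: Replaces A's single fused forward scan tracking both flags with two separate passes: an any() pass for 'End CKPT' and a reversed early-terminating index search for the last 'Start CKPT'.
import Mathlib
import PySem

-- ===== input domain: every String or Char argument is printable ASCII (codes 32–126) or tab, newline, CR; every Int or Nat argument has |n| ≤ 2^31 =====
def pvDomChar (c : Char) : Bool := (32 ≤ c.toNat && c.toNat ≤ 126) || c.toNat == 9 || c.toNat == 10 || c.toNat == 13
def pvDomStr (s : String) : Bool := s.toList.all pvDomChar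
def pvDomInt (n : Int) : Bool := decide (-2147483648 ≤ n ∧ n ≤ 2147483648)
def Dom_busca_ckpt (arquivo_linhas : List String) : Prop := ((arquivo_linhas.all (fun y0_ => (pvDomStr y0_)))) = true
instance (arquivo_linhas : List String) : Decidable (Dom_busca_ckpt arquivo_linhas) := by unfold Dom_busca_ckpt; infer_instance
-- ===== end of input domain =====

-- B replaces A's single fused forward scan with two separate passes (an any() pass for
-- 'End CKPT' and a reversed early-terminating search for the last 'Start CKPT'); alternative decomposition, same cost.

-- ===== PORT A =====
-- A: one forward enumerate loop updating (start, end) in place.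
def busca_ckpt (arquivo_linhas : List String) : Int × Bool :=
  (PySem.List.enumerate arquivo_linhas).foldl
    (fun st p =>
      let st1 := if PySem.Str.isIn "Start CKPT" p.2 then (p.1, st.2) else st
      if PySem.Str.isIn "End CKPT" p.2 then (st1.1, true) else st1)
    (0, false)

-- ===== PORT B =====
-- B's reversed loop 'for i in range(len-1, -1, -1): … break': structural recursion
-- counting the index down; returns at the first 'Start CKPT' hit, defaults to 0.
def buscaStartDown (xs : List String) : Nat → Int
  | 0 => 0
  | n + 1 =>
    if PySem.Str.isIn "Start CKPT" (xs.getD n "") then (n : Int)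
    else buscaStartDown xs n

def busca_ckpt_alt (arquivo_linhas : List String) : Int × Bool :=
  (buscaStartDown arquivo_linhas arquivo_linhas.length,
   arquivo_linhas.any (fun linha => PySem.Str.isIn "End CKPT" linha))

-- ===== PRECONDITION & SPEC =====
def Spec_busca_ckpt (arquivo_linhas : List String) (out : Int × Bool) : Prop := out = busca_ckpt_alt arquivo_linhas
instance (arquivo_linhas : List String) (out : Int × Bool) : Decidable (Spec_busca_ckpt arquivo_linhas out) := by unfold Spec_busca_ckpt; infer_instance

-- ===== CLAIM (what is proved, stated in full; the proofs are below) =====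
def Claim_equal_busca_ckpt : Prop := ∀ (arquivo_linhas : List String), Dom_busca_ckpt arquivo_linhas → Spec_busca_ckpt arquivo_linhas (busca_ckpt arquivo_linhas)

-- ===== LEMMAS AND PROOFS =====

theorem enumerate_append_singleton {α : Type} (xs : List α) (x : α) (s : Int) :
    PySem.List.enumerate (xs ++ [x]) s
      = PySem.List.enumerate xs s ++ [(s + xs.length, x)] := by
  induction xs generalizing s with
  | nil => simp [PySem.List.enumerate]
  | cons y ys ih =>
    simp [PySem.List.enumerate, ih]
    omega

theorem buscaStartDown_append (xs : List String) (x : String) (n : Nat) (hn : n ≤ xs.length) :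
    buscaStartDown (xs ++ [x]) n = buscaStartDown xs n := by
  induction n with
  | zero => rfl
  | succ k ih =>
    have hk : k < xs.length := by omega
    rw [buscaStartDown, buscaStartDown, List.getD, List.getD,
      List.getElem?_append_left hk, ih (by omega)]

theorem buscaStartDown_of_hit (xs : List String) (x : String)
    (h : PySem.Str.isIn "Start CKPT" x = true) :
    buscaStartDown (xs ++ [x]) (xs.length + 1) = (xs.length : Int) := by
  have hx : (xs ++ [x]).getD xs.length "" = x := by
    simp [List.getD]
  rw [buscaStartDown, hx, if_pos h]

theorem buscaStartDown_of_miss (xs : List String) (x : String)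
    (h : PySem.Str.isIn "Start CKPT" x = false) :
    buscaStartDown (xs ++ [x]) (xs.length + 1) = buscaStartDown xs xs.length := by
  have hx : (xs ++ [x]).getD xs.length "" = x := by
    simp [List.getD]
  rw [buscaStartDown, hx, if_neg (by simpa using h), buscaStartDown_append xs x xs.length (le_refl _)]

theorem busca_ckpt_eq_alt (xs : List String) : busca_ckpt xs = busca_ckpt_alt xs := by
  induction xs using List.reverseRecOn with
  | nil => rfl
  | append_singleton ys y ih =>
    have hA : busca_ckpt (ys ++ [y])
        = (let st := busca_ckpt ys
           let st1 := if PySem.Str.isIn "Start CKPT" y then ((ys.length : Int), st.2) else st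
           if PySem.Str.isIn "End CKPT" y then (st1.1, true) else st1) := by
      simp only [busca_ckpt, enumerate_append_singleton ys y 0, List.foldl_append,
        List.foldl_cons, List.foldl_nil, zero_add]
    rw [hA, ih]
    simp only [busca_ckpt_alt, List.any_append, List.length_append, List.length_cons,
      List.length_nil, List.any_cons, List.any_nil]
    rcases hS : PySem.Str.isIn "Start CKPT" y with _ | _ <;>
      rcases hE : PySem.Str.isIn "End CKPT" y with _ | _ <;>
        simp <;>
          first
            | rw [buscaStartDown_of_hit ys y hS]
            | rw [buscaStartDown_of_miss ys y hS]

-- ===== VERDICT (by name: the statement is the Claim_ definition above) =====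
theorem busca_ckpt_spec : Claim_equal_busca_ckpt := by
  intro xs _
  exact busca_ckpt_eq_alt xs
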